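-- pv_equiv track=rewrite | github.com/CSE-Linguistics/POS_Tagger | SVM/utils.py | check_if_prefix
-- ===== SOURCE A (Python) =====
-- def check_if_prefix(words, conditions):
-- 	li = []
-- 	for i in words:
-- 		val = 0
-- 		for j in conditions:
-- 			if i.lower().startswith(j):
-- 				val = 1
-- 				break
-- 		li.append(val)
-- 	return li
-- ===== SOURCE B (Python) =====
-- def check_if_prefix(words, conditions):
-- 	cond_set = set(conditions)
-- 	return [1 if any(w.lower()[:l] in cond_set for l in range(len(w) + 1)) else 0 for w in words]
-- ===== Notes on version B (the rewrite author's own statement) =====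
-- stated objective: faster
-- what changed: Instead of scanning the whole condition list per word, B builds a hash set of conditions once and tests each prefix of the lowercased word for membership, removing the inner scan over conditions.
import Mathlib
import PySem

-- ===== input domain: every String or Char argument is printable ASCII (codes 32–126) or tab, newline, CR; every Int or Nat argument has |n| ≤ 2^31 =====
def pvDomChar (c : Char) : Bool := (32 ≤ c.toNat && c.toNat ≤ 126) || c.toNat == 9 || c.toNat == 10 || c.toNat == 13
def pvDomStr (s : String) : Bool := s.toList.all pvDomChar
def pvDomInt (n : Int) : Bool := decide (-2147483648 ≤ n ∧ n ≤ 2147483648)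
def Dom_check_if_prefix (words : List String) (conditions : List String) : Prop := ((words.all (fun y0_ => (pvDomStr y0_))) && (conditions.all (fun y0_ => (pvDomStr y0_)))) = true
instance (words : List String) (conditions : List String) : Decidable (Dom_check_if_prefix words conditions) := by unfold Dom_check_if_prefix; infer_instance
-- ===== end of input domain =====

-- B builds a set of the conditions once and tests each prefix of the lowercased word for membership, removing the inner scan over conditions (faster: the per-word cost no longer depends on the number of conditions).
-- ===== PORT A =====
-- inner 'for j in conditions: if i.lower().startswith(j): val = 1; break' — returns 1 at the first match, else 0
def cipInner (i : String) (conditions : List String) : Int :=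
  match conditions with
  | [] => 0
  | j :: rest => if PySem.Str.startswith (PySem.Str.lower i) j then 1 else cipInner i rest

def check_if_prefix (words : List String) (conditions : List String) : List Int :=
  words.foldl (fun li i => li ++ [cipInner i conditions]) []

-- ===== PORT B =====
def check_if_prefix_alt (words : List String) (conditions : List String) : List Int :=
  let cond_set : PySem.Set String := PySem.Set.ofList conditions
  words.map (fun w =>
    if (PySem.List.pyRange 0 ((PySem.Str.len w : Int) + 1) 1).any
        (fun l => PySem.Set.contains cond_set (PySem.Str.slice (PySem.Str.lower w) none (some l)))
    then (1 : Int) else 0)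

-- ===== PRECONDITION & SPEC =====
def Spec_check_if_prefix (words : List String) (conditions : List String) (out : List Int) : Prop := out = check_if_prefix_alt words conditions
instance (words : List String) (conditions : List String) (out : List Int) : Decidable (Spec_check_if_prefix words conditions out) := by unfold Spec_check_if_prefix; infer_instance

-- ===== CLAIM (what is proved, stated in full; the proofs are below) =====
def Claim_equal_check_if_prefix : Prop := ∀ (words : List String) (conditions : List String), Dom_check_if_prefix words conditions → Spec_check_if_prefix words conditions (check_if_prefix words conditions)

-- ===== LEMMAS AND PROOFS =====

-- ===== VERDICT (by name: the statement is the Claim_ definition above) =====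
-- A's first-match inner loop is the indicator of "some condition is a prefix"
lemma cipInner_eq (w : String) (cs : List String) :
    cipInner w cs =
      (if ∃ j ∈ cs, PySem.Str.startswith (PySem.Str.lower w) j = true then (1 : Int) else 0) := by
  induction cs with
  | nil => simp [cipInner]
  | cons j rest ih =>
    simp only [cipInner, ih]
    by_cases h : PySem.Str.startswith (PySem.Str.lower w) j = true
    · rw [if_pos h, if_pos ⟨j, List.mem_cons_self, h⟩]
    · rw [if_neg h]
      congr 1
      rw [eq_iff_iff]
      constructor
      · rintro ⟨a, ha, hp⟩
        exact ⟨a, List.mem_cons_of_mem _ ha, hp⟩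
      · rintro ⟨a, ha, hp⟩
        rcases List.mem_cons.mp ha with rfl | ha
        · exact absurd hp h
        · exact ⟨a, ha, hp⟩

-- some condition is a prefix of the lowered word ↔ some prefix (by length) of it is a condition
lemma prefix_exists_iff (w : String) (cs : List String) :
    (∃ j ∈ cs, PySem.Str.startswith (PySem.Str.lower w) j = true) ↔
      (∃ l ∈ PySem.List.pyRange 0 ((PySem.Str.len w : Int) + 1) 1,
        PySem.Set.contains (PySem.Set.ofList cs) (PySem.Str.slice (PySem.Str.lower w) none (some l)) = true) := by
  have hlen : (PySem.Str.lower w).toList.length = PySem.Str.len w := by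
    simp [PySem.Str.len_eq, PySem.Chars.lower]
  constructor
  · rintro ⟨j, hj, hpre⟩
    rw [PySem.Str.startswith_eq, PySem.Chars.startswith_iff] at hpre
    refine ⟨(j.toList.length : Int), ?_, ?_⟩
    · rw [PySem.List.mem_pyRange_one]
      have := hpre.length_le
      omega
    · rw [PySem.Set.contains_iff, PySem.Set.mem_ofList]
      have hs : (PySem.Str.slice (PySem.Str.lower w) none (some (j.toList.length : Int))).toList = j.toList := by
        rw [PySem.Str.toList_slice, PySem.Chars.slice_eq_listSlice, PySem.List.slice_to_natCast]
        exact (List.prefix_iff_eq_take.mp hpre).symm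
      rwa [String.toList_inj.mp hs]
  · rintro ⟨l, hl, hc⟩
    rw [PySem.List.mem_pyRange_one] at hl
    rw [PySem.Set.contains_iff, PySem.Set.mem_ofList] at hc
    refine ⟨_, hc, ?_⟩
    rw [PySem.Str.startswith_eq, PySem.Chars.startswith_iff,
        PySem.Str.toList_slice, PySem.Chars.slice_eq_listSlice, PySem.List.slice_to _ hl.1]
    exact List.take_prefix _ _

-- per-word agreement: A's inner loop agrees with B's prefix-membership test
lemma cip_point (w : String) (conditions : List String) :
    cipInner w conditions =
      (if (PySem.List.pyRange 0 ((PySem.Str.len w : Int) + 1) 1).any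
          (fun l => PySem.Set.contains (PySem.Set.ofList conditions) (PySem.Str.slice (PySem.Str.lower w) none (some l)))
       then (1 : Int) else 0) := by
  rw [cipInner_eq]
  congr 1
  rw [eq_iff_iff, prefix_exists_iff w conditions, List.any_eq_true]

theorem check_if_prefix_spec : Claim_equal_check_if_prefix := by
  intro words conditions _
  unfold Spec_check_if_prefix check_if_prefix check_if_prefix_alt
  rw [PySem.List.foldl_append_singleton_eq_map (fun i => cipInner i conditions) words []]
  simp only [List.nil_append]
  exact List.map_congr_left (fun w _ => cip_point w conditions)
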